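-- pv_equiv track=rewrite | github.com/Kyle-Bolin/Silverthread_test | find_tumor.py | tumor_test
-- ===== SOURCE A (Python) =====
-- def tumor_test(connected_components):
--     group_list = {}
--     group_values = connected_components.values()
--     for value in group_values:
--         if value[1] not in group_list: group_list[value[1]] = set()
--         group_list[value[1]].add(value[0])
--     for x in group_list:
--         if len(group_list[x]) > 1 :
--             return True
--     return False
-- ===== SOURCE B (Python) =====
-- def tumor_test(connected_components):
--     first_of_group = {}
--     for value in connected_components.values():
--         group = value[1]
--         if group in first_of_group:
--             if first_of_group[group] != value[0]:
--                 return True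
--         else:
--             first_of_group[group] = value[0]
--     return False
-- ===== Notes on version B (the rewrite author's own statement) =====
-- stated objective: simpler
-- what changed: Replaces the dict-of-sets accumulation plus a second scan over all groups by a single pass keeping only the first member seen per group, returning True immediately on the first conflicting member.
import Mathlib
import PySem

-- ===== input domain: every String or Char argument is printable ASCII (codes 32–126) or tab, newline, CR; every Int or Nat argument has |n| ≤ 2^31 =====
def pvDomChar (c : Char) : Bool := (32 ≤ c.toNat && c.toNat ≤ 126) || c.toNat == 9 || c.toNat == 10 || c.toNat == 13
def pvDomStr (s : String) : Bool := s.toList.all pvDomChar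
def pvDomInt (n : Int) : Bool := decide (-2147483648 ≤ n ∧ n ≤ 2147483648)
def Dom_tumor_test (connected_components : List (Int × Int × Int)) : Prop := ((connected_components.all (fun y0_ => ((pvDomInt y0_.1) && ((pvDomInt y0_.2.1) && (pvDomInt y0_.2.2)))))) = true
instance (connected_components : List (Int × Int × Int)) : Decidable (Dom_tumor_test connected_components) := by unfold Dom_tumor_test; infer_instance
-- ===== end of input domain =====

-- B replaces A's dict-of-sets build plus second scan by one pass recording the first
-- member per group and returning True on the first conflict (objective: simpler).

-- the dict argument materialised from the association list (shared argument decoding)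
def pvToDict (connected_components : List (Int × Int × Int)) : PySem.Dict Int (Int × Int) :=
  PySem.Dict.ofList (connected_components.map (fun t => (t.1, (t.2.1, t.2.2))))

-- ===== PORT A =====
-- body of A's first loop: 'if value[1] not in group_list: group_list[value[1]] = set(); group_list[value[1]].add(value[0])'
def tumorStepA (d : PySem.Dict Int (PySem.Set Int)) (v : Int × Int) : PySem.Dict Int (PySem.Set Int) :=
  let d' := if d.contains v.2 then d else d.insert v.2 PySem.Set.empty
  d'.modify v.2 PySem.Set.empty (fun s => PySem.Set.add s v.1)

-- A's second loop: 'for x in group_list: if len(group_list[x]) > 1: return True / return False'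
def tumorAnyA (d : PySem.Dict Int (PySem.Set Int)) : Bool :=
  d.keys.any (fun x => PySem.Set.len (d.getD x PySem.Set.empty) > 1)

def tumor_test (connected_components : List (Int × Int × Int)) : Bool :=
  let group_values := (pvToDict connected_components).values
  let group_list := group_values.foldl tumorStepA PySem.Dict.empty
  tumorAnyA group_list

-- ===== PORT B =====
def tumorAltLoop (s : PySem.Dict Int Int) (vals : List (Int × Int)) : Bool :=
  match vals with
  | [] => false
  | v :: rest =>
    if s.contains v.2 then
      if s.getD v.2 0 ≠ v.1 then true else tumorAltLoop s rest
    else tumorAltLoop (s.insert v.2 v.1) rest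

def tumor_test_alt (connected_components : List (Int × Int × Int)) : Bool :=
  tumorAltLoop PySem.Dict.empty (pvToDict connected_components).values

-- ===== PRECONDITION & SPEC =====
def Spec_tumor_test (connected_components : List (Int × Int × Int)) (out : Bool) : Prop := out = tumor_test_alt connected_components
instance (connected_components : List (Int × Int × Int)) (out : Bool) : Decidable (Spec_tumor_test connected_components out) := by unfold Spec_tumor_test; infer_instance

-- ===== CLAIM (what is proved, stated in full; the proofs are below) =====
def Claim_equal_tumor_test : Prop := ∀ (connected_components : List (Int × Int × Int)), Dom_tumor_test connected_components → Spec_tumor_test connected_components (tumor_test connected_components)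

-- ===== LEMMAS AND PROOFS =====

-- a set only grows under Set.add
lemma len_le_len_add (s : PySem.Set Int) (x : Int) :
    PySem.Set.len s ≤ PySem.Set.len (PySem.Set.add s x) := by
  rw [PySem.Set.add_eq_ite]
  split_ifs with h
  · exact le_refl _
  · simp [PySem.Set.len]

-- once some group set already exceeds one element, A's final answer is True
lemma tumor_grow (vals : List (Int × Int)) :
    ∀ (d : PySem.Dict Int (PySem.Set Int)) (k : Int),
      k ∈ d.keys → 1 < PySem.Set.len (d.getD k PySem.Set.empty) →
      tumorAnyA (vals.foldl tumorStepA d) = true := by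
  induction vals with
  | nil =>
    intro d k hk hlen
    simp only [List.foldl_nil, tumorAnyA, List.any_eq_true]
    exact ⟨k, hk, by simpa using hlen⟩
  | cons v rest ih =>
    intro d k hk hlen
    simp only [List.foldl_cons]
    by_cases hc : d.contains v.2 = true
    · have hstep : tumorStepA d v = d.modify v.2 PySem.Set.empty (fun s => PySem.Set.add s v.1) := by
        simp [tumorStepA, hc]
      rw [hstep]
      apply ih _ k
      · rw [PySem.Dict.keys_modify]
        exact (PySem.Dict.mem_keys_insert _ _ _ _).mpr (Or.inr hk)
      · rw [PySem.Dict.getD_modify]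
        split_ifs with he
        · subst he
          exact lt_of_lt_of_le hlen (len_le_len_add _ _)
        · exact hlen
    · have hc' : d.contains v.2 = false := by simpa using hc
      have hne : k ≠ v.2 := fun he =>
        hc ((PySem.Dict.contains_iff_mem_keys d v.2).mpr (he ▸ hk))
      have hstep : tumorStepA d v =
          (d.insert v.2 PySem.Set.empty).modify v.2 PySem.Set.empty (fun s => PySem.Set.add s v.1) := by
        simp [tumorStepA, hc']
      rw [hstep]
      apply ih _ k
      · rw [PySem.Dict.keys_modify]
        exact (PySem.Dict.mem_keys_insert _ _ _ _).mpr
          (Or.inr ((PySem.Dict.mem_keys_insert _ _ _ _).mpr (Or.inr hk)))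
      · rw [PySem.Dict.getD_modify, if_neg hne, PySem.Dict.getD_insert, if_neg hne]
        exact hlen

-- the two loops agree, given that every group recorded so far is a singleton set on
-- A's side whose element is B's recorded first member
lemma tumor_main (vals : List (Int × Int)) :
    ∀ (d : PySem.Dict Int (PySem.Set Int)) (s : PySem.Dict Int Int),
      (∀ k, k ∈ d.keys ↔ k ∈ s.keys) →
      (∀ k, k ∈ s.keys → d.getD k PySem.Set.empty = [s.getD k 0]) →
      tumorAnyA (vals.foldl tumorStepA d) = tumorAltLoop s vals := by
  induction vals with
  | nil =>
    intro d s hmem hval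
    simp only [List.foldl_nil, tumorAltLoop, tumorAnyA, List.any_eq_false]
    intro k hk
    have h1 : d.getD k [] = [s.getD k 0] := hval k ((hmem k).mp hk)
    simp [PySem.Set.len, h1]
  | cons v rest ih =>
    intro d s hmem hval
    simp only [List.foldl_cons, tumorAltLoop]
    by_cases hc : s.contains v.2 = true
    · have hks : v.2 ∈ s.keys := (PySem.Dict.contains_iff_mem_keys s v.2).mp hc
      have hkd : v.2 ∈ d.keys := (hmem v.2).mpr hks
      have hcd : d.contains v.2 = true := (PySem.Dict.contains_iff_mem_keys d v.2).mpr hkd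
      have hstep : tumorStepA d v = d.modify v.2 PySem.Set.empty (fun s => PySem.Set.add s v.1) := by
        simp [tumorStepA, hcd]
      rw [hstep, if_pos hc]
      set f := s.getD v.2 0 with hf
      have hsingle : d.getD v.2 PySem.Set.empty = [f] := hval v.2 hks
      by_cases hne : f ≠ v.1
      · rw [if_pos hne]
        apply tumor_grow
        · rw [PySem.Dict.keys_modify]
          exact (PySem.Dict.mem_keys_insert _ _ _ _).mpr (Or.inr hkd)
        · rw [PySem.Dict.getD_modify, if_pos rfl, hsingle, PySem.Set.add_eq_ite]
          have : v.1 ∉ ([f] : List Int) := by simpa using fun h => hne h.symm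
          rw [if_neg this]
          simp [PySem.Set.len]
      · rw [if_neg hne]
        rw [not_not] at hne
        apply ih
        · intro k
          rw [PySem.Dict.keys_modify, PySem.Dict.mem_keys_insert]
          constructor
          · rintro (rfl | hk)
            · exact hks
            · exact (hmem k).mp hk
          · intro hk; exact Or.inr ((hmem k).mpr hk)
        · intro k hk
          rw [PySem.Dict.getD_modify]
          split_ifs with he
          · subst he
            rw [hsingle, ← hf, hne, PySem.Set.add_eq_ite, if_pos (by simp)]
          · exact hval k hk
    · have hc' : s.contains v.2 = false := by simpa using hc
      have hks : v.2 ∉ s.keys := fun h => hc ((PySem.Dict.contains_iff_mem_keys s v.2).mpr h)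
      have hkd : v.2 ∉ d.keys := fun h => hks ((hmem v.2).mp h)
      have hcd : d.contains v.2 = false := by
        simpa using fun h => hkd ((PySem.Dict.contains_iff_mem_keys d v.2).mp h)
      have hstep : tumorStepA d v =
          (d.insert v.2 PySem.Set.empty).modify v.2 PySem.Set.empty (fun s => PySem.Set.add s v.1) := by
        simp [tumorStepA, hcd]
      rw [hstep, if_neg (by simp [hc'])]
      apply ih
      · intro k
        rw [PySem.Dict.keys_modify, PySem.Dict.mem_keys_insert, PySem.Dict.mem_keys_insert,
          PySem.Dict.mem_keys_insert]
        constructor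
        · rintro (rfl | rfl | hk)
          · exact Or.inl rfl
          · exact Or.inl rfl
          · exact Or.inr ((hmem k).mp hk)
        · rintro (rfl | hk)
          · exact Or.inl rfl
          · exact Or.inr (Or.inr ((hmem k).mpr hk))
      · intro k hk
        rw [PySem.Dict.getD_modify]
        by_cases he : k = v.2
        · subst he
          rw [if_pos rfl, PySem.Dict.getD_insert, if_pos rfl, PySem.Dict.getD_insert, if_pos rfl]
          simp [PySem.Set.empty]
        · rw [if_neg he, PySem.Dict.getD_insert, if_neg he, PySem.Dict.getD_insert, if_neg he]
          rcases (PySem.Dict.mem_keys_insert _ _ _ _).mp hk with rfl | hk'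
          · exact absurd rfl he
          · exact hval k hk'

-- ===== VERDICT (by name: the statement is the Claim_ definition above) =====
theorem tumor_test_spec : Claim_equal_tumor_test := by
  intro cc _
  unfold Spec_tumor_test tumor_test tumor_test_alt
  exact tumor_main _ _ _ (by simp [PySem.Dict.keys_empty]) (by simp [PySem.Dict.keys_empty])
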